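-- pv_equiv track=rewrite | github.com/ikramulkayes/Python_Season_4 | 2.py | splittingArray
-- ===== SOURCE A (Python) =====
-- def splittingArray(lst):
--
--
--     for belm in range(1,len(lst)):
--         sum1 = 0
--         sum2 = 0
--         for elm in range(belm):
--
--             sum1 += lst[elm]
--
--         for elm in range(belm,len(lst)):
--
--             sum2 += lst[elm]
--
--         if sum1 == sum2:
--             return True
--     return False
-- ===== SOURCE B (Python) =====
-- def splittingArray(lst):
--     total = sum(lst)
--     running = 0
--     for x in lst[:-1]:
--         running += x
--         if 2 * running == total:
--             return True
--     return False
-- ===== Notes on version B (the rewrite author's own statement) =====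
-- stated objective: faster
-- what changed: Replaced the quadratic re-summing of both halves at every split point by a single pass that maintains a running prefix sum and compares 2*prefix with the precomputed total.
import Mathlib
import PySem

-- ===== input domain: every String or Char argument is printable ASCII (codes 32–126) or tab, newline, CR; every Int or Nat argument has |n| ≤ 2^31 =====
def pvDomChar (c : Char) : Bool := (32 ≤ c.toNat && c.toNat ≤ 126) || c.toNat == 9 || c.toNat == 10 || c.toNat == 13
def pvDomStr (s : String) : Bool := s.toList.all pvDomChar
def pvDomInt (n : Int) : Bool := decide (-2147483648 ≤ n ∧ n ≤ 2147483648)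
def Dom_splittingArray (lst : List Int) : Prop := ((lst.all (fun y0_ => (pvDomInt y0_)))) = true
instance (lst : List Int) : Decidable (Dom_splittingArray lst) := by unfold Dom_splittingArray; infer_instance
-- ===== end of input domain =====

-- B is a one-pass rewrite (running prefix sum vs total) of A's quadratic re-summing; equivalence of return values is proved below.

-- ===== PORT A =====
-- outer 'for belm in range(1, len(lst))' with early return
def splittingArrayLoop (lst : List Int) : List Int → Bool
  | [] => false
  | belm :: rest =>
    let sum1 := (PySem.List.pyRange 0 belm 1).foldl (fun s elm => s + PySem.List.pyGetD lst elm 0) 0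
    let sum2 := (PySem.List.pyRange belm (lst.length : Int) 1).foldl (fun s elm => s + PySem.List.pyGetD lst elm 0) 0
    if sum1 == sum2 then true else splittingArrayLoop lst rest

def splittingArray (lst : List Int) : Bool :=
  splittingArrayLoop lst (PySem.List.pyRange 1 (lst.length : Int) 1)

-- ===== PORT B =====
-- 'for x in lst[:-1]' with running prefix sum and early return
def splittingArrayAltLoop (total : Int) (running : Int) : List Int → Bool
  | [] => false
  | x :: xs =>
    let r := running + x
    if 2 * r == total then true else splittingArrayAltLoop total r xs

def splittingArray_alt (lst : List Int) : Bool :=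
  splittingArrayAltLoop lst.sum 0 (PySem.List.slice lst none (some (-1)))

-- ===== PRECONDITION & SPEC =====
def Spec_splittingArray (lst : List Int) (out : Bool) : Prop := out = splittingArray_alt lst
instance (lst : List Int) (out : Bool) : Decidable (Spec_splittingArray lst out) := by unfold Spec_splittingArray; infer_instance

-- ===== CLAIM (what is proved, stated in full; the proofs are below) =====
def Claim_equal_splittingArray : Prop := ∀ (lst : List Int), Dom_splittingArray lst → Spec_splittingArray lst (splittingArray lst)

-- ===== LEMMAS AND PROOFS =====

theorem pv_sum1_eq (lst : List Int) (n : Nat) (h : n ≤ lst.length) :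
    (PySem.List.pyRange 0 (n : Int) 1).foldl (fun s elm => s + PySem.List.pyGetD lst elm 0) 0
      = (lst.take n).sum := by
  induction n with
  | zero => simp
  | succ m ih =>
    have hm : m ≤ lst.length := Nat.le_of_succ_le h
    have hcons : PySem.List.pyRange 0 ((m : Int) + 1) 1
        = PySem.List.pyRange 0 (m : Int) 1 ++ [(m : Int)] :=
      PySem.List.pyRange_one_succ_right (by positivity)
    have hlt : m < lst.length := h
    have hget : PySem.List.pyGetD lst (m : Int) 0 = lst[m] := by
      rw [PySem.List.pyGetD_natCast]
      simp [List.getD_eq_getElem?_getD, hlt]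
    have hts : (lst.take (m + 1)).sum = (lst.take m).sum + lst[m] := by
      rw [List.take_add_one, List.sum_append]
      simp [List.getElem?_eq_getElem hlt]
    push_cast
    rw [hcons, List.foldl_append, ih hm, hts]
    simp only [List.foldl_cons, List.foldl_nil, hget]

theorem pv_foldl_add (xs : List Int) (init : Int) :
    xs.foldl (fun s x => s + x) init = init + xs.sum := by
  induction xs generalizing init with
  | nil => simp
  | cons y ys ih => simp [ih]; ring

theorem pv_sum2_eq (lst : List Int) (n : Nat) :
    (PySem.List.pyRange (n : Int) (lst.length : Int) 1).foldl (fun s elm => s + PySem.List.pyGetD lst elm 0) 0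
      = (lst.drop n).sum := by
  rw [PySem.List.foldl_pyRange_pyGetD' lst 0 (fun s x => s + x) 0 (by positivity)]
  simp [pv_foldl_add]

theorem pv_main (fuel : Nat) (lst : List Int) (i : Nat)
    (hf : lst.length ≤ i + fuel) (h : i + 1 ≤ lst.length) :
    splittingArrayLoop lst (PySem.List.pyRange ((i : Int) + 1) (lst.length : Int) 1)
      = splittingArrayAltLoop lst.sum (lst.take i).sum (lst.dropLast.drop i) := by
  induction fuel generalizing i with
  | zero => omega
  | succ f ih =>
    by_cases hend : i + 1 = lst.length
    · have h1 : PySem.List.pyRange ((i : Int) + 1) (lst.length : Int) 1 = [] := by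
        apply PySem.List.pyRange_one_eq_nil; omega
      have h2 : lst.dropLast.drop i = [] := by
        apply List.drop_eq_nil_of_le; simp [List.length_dropLast]; omega
      rw [h1, h2]; rfl
    · have hlt : i + 1 < lst.length := by omega
      have hcons : PySem.List.pyRange ((i : Int) + 1) (lst.length : Int) 1
          = ((i : Int) + 1) :: PySem.List.pyRange ((i : Int) + 1 + 1) (lst.length : Int) 1 := by
        apply PySem.List.pyRange_one_cons; omega
      have hidl : i < lst.dropLast.length := by simp [List.length_dropLast]; omega
      have hdl : lst.dropLast.drop i = lst.dropLast[i] :: lst.dropLast.drop (i + 1) :=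
        List.drop_eq_getElem_cons hidl
      have hgd : lst.dropLast[i] = lst[i]'(by omega) := List.getElem_dropLast ..
      have hsum1 : (PySem.List.pyRange 0 ((i : Int) + 1) 1).foldl
            (fun s elm => s + PySem.List.pyGetD lst elm 0) 0 = (lst.take (i + 1)).sum := by
        have := pv_sum1_eq lst (i + 1) (by omega)
        push_cast at this; exact this
      have hsum2 : (PySem.List.pyRange ((i : Int) + 1) (lst.length : Int) 1).foldl
            (fun s elm => s + PySem.List.pyGetD lst elm 0) 0 = (lst.drop (i + 1)).sum := by
        have := pv_sum2_eq lst (i + 1)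
        push_cast at this; exact this
      have htd : (lst.take (i + 1)).sum + (lst.drop (i + 1)).sum = lst.sum := by
        rw [← List.sum_append, List.take_append_drop]
      have hts : (lst.take (i + 1)).sum = (lst.take i).sum + lst[i]'(by omega) := by
        rw [List.take_add_one, List.sum_append]
        simp [List.getElem?_eq_getElem (show i < lst.length by omega)]
      rw [hcons, hdl]
      show (if ((PySem.List.pyRange 0 ((i:Int)+1) 1).foldl (fun s elm => s + PySem.List.pyGetD lst elm 0) 0
              == (PySem.List.pyRange ((i:Int)+1) (lst.length : Int) 1).foldl (fun s elm => s + PySem.List.pyGetD lst elm 0) 0)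
            then true
            else splittingArrayLoop lst (PySem.List.pyRange ((i:Int)+1+1) (lst.length : Int) 1))
          = (if (2 * ((lst.take i).sum + lst.dropLast[i]) == lst.sum) then true
             else splittingArrayAltLoop lst.sum ((lst.take i).sum + lst.dropLast[i]) (lst.dropLast.drop (i+1)))
      rw [hsum1, hsum2, hgd, ← hts]
      have hcond : ((lst.take (i + 1)).sum == (lst.drop (i + 1)).sum)
          = (2 * (lst.take (i + 1)).sum == lst.sum) := by
        apply Bool.eq_iff_iff.mpr
        simp only [beq_iff_eq]
        omega
      rw [hcond]
      by_cases hc : 2 * (lst.take (i + 1)).sum = lst.sum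
      · simp [hc]
      · have hcb : (2 * (lst.take (i + 1)).sum == lst.sum) = false := by
          simp [hc]
        rw [hcb]; simp only [Bool.false_eq_true, if_false]
        have := ih (i + 1) (by omega) (by omega)
        push_cast at this ⊢
        rw [this, hts]

theorem pv_slice_dropLast (lst : List Int) :
    PySem.List.slice lst none (some (-1)) = lst.dropLast := by
  rw [show ((-1 : Int)) = -(1 : Int) by rfl, PySem.List.slice_to_neg_one]

-- ===== VERDICT (by name: the statement is the Claim_ definition above) =====
theorem splittingArray_spec : Claim_equal_splittingArray := by
  intro lst _
  unfold Spec_splittingArray splittingArray splittingArray_alt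
  rw [pv_slice_dropLast]
  cases lst with
  | nil => rfl
  | cons x xs =>
    have := pv_main (x :: xs).length (x :: xs) 0 (by omega) (by simp)
    simpa using this
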